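-- pv_equiv track=rewrite | github.com/faeqsu10/self-improving-skill | src/verifier.py | get_sessions_around_date
-- ===== SOURCE A (Python) =====
-- def get_sessions_around_date(sessions: list[dict], date_str: str, project: str | None = None) -> tuple[list, list]:
--     """특정 날짜 기준으로 전/후 세션을 분리한다."""
--     before = []
--     after = []
--     for s in sessions:
--         if project and s.get("project") != project:
--             continue
--         if s.get("date", "") < date_str:
--             before.append(s)
--         else:
--             after.append(s)
--     return before, after
-- ===== SOURCE B (Python) =====
-- def get_sessions_around_date(sessions, date_str, project=None):
--     def keep(s):
--         return not project or s.get("project") == project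
--     before = [s for s in sessions if keep(s) and s.get("date", "") < date_str]
--     after = [s for s in sessions if keep(s) and not s.get("date", "") < date_str]
--     return before, after
-- ===== Notes on version B (the rewrite author's own statement) =====
-- stated objective: idiomatic
-- what changed: Replaces the single accumulating loop with two independent filtering comprehensions over sessions (one per side of the date cutoff) sharing a keep() predicate.
import Mathlib
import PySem

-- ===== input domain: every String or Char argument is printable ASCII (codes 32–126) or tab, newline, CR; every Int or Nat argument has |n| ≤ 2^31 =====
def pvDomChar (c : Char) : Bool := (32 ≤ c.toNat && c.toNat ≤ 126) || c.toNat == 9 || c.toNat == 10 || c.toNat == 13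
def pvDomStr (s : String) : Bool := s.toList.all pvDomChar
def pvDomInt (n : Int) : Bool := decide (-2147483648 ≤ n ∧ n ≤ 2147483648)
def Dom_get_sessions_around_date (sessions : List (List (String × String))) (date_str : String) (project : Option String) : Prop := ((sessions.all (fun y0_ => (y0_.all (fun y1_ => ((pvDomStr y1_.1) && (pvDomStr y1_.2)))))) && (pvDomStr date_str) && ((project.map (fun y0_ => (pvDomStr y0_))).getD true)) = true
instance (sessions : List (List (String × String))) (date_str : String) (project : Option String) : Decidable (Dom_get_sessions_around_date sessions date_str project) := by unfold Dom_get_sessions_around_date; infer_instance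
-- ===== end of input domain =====

-- B replaces A's single accumulating loop by two independent filtering passes (one per side of the cutoff); objective: idiomatic.


-- ===== PORT A =====
-- one pass: two accumulators, 'continue' when the project guard fails
def get_sessions_around_date (sessions : List (List (String × String))) (date_str : String) (project : Option String) : (List (List (String × String))) × (List (List (String × String))) :=
  sessions.foldl
    (fun acc s =>
      if (match project with | none => false | some p => decide (p ≠ "")) &&
         decide ((PySem.Dict.mk s).get? "project" ≠ project) then acc
      else if (PySem.Dict.mk s).getD "date" "" < date_str then (acc.1 ++ [s], acc.2)
      else (acc.1, acc.2 ++ [s]))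
    ([], [])

-- ===== PORT B =====
-- shared keep() predicate: 'not project or s.get("project") == project'
def pvKeep (project : Option String) (s : List (String × String)) : Bool :=
  match project with
  | none => true
  | some p => decide (p = "") || ((PySem.Dict.mk s).get? "project" == some p)

def get_sessions_around_date_alt (sessions : List (List (String × String))) (date_str : String) (project : Option String) : (List (List (String × String))) × (List (List (String × String))) :=
  (sessions.filter (fun s => pvKeep project s && decide ((PySem.Dict.mk s).getD "date" "" < date_str)),
   sessions.filter (fun s => pvKeep project s && !decide ((PySem.Dict.mk s).getD "date" "" < date_str)))

-- ===== PRECONDITION & SPEC =====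
def Spec_get_sessions_around_date (sessions : List (List (String × String))) (date_str : String) (project : Option String) (out : (List (List (String × String))) × (List (List (String × String)))) : Prop := out = get_sessions_around_date_alt sessions date_str project
instance (sessions : List (List (String × String))) (date_str : String) (project : Option String) (out : (List (List (String × String))) × (List (List (String × String)))) : Decidable (Spec_get_sessions_around_date sessions date_str project out) := by unfold Spec_get_sessions_around_date; infer_instance

-- ===== CLAIM (what is proved, stated in full; the proofs are below) =====
def Claim_equal_get_sessions_around_date : Prop := ∀ (sessions : List (List (String × String))) (date_str : String) (project : Option String), Dom_get_sessions_around_date sessions date_str project → Spec_get_sessions_around_date sessions date_str project (get_sessions_around_date sessions date_str project)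

-- ===== LEMMAS AND PROOFS =====
-- A's skip condition is the negation of B's keep predicate
lemma pvSkip_eq_not_keep (project : Option String) (s : List (String × String)) :
    ((match project with | none => false | some p => decide (p ≠ "")) &&
      decide ((PySem.Dict.mk s).get? "project" ≠ project)) = !pvKeep project s := by
  cases project with
  | none => simp [pvKeep]
  | some p =>
    by_cases hp : p = "" <;>
      simp [pvKeep, hp, decide_not, Bool.beq_eq_decide_eq]

-- loop invariant: folding from (b, a) appends exactly the two filtered lists
lemma pvLoop_spec (date_str : String) (project : Option String) :
    ∀ (sessions : List (List (String × String))) (b a : List (List (String × String))),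
      sessions.foldl
        (fun acc s =>
          if (match project with | none => false | some p => decide (p ≠ "")) &&
             decide ((PySem.Dict.mk s).get? "project" ≠ project) then acc
          else if (PySem.Dict.mk s).getD "date" "" < date_str then (acc.1 ++ [s], acc.2)
          else (acc.1, acc.2 ++ [s]))
        (b, a)
      = (b ++ sessions.filter (fun s => pvKeep project s && decide ((PySem.Dict.mk s).getD "date" "" < date_str)),
         a ++ sessions.filter (fun s => pvKeep project s && !decide ((PySem.Dict.mk s).getD "date" "" < date_str))) := by
  intro sessions
  induction sessions with
  | nil => intro b a; simp
  | cons s rest ih =>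
    intro b a
    rw [List.foldl_cons, pvSkip_eq_not_keep project s]
    by_cases hk : pvKeep project s
    · by_cases hd : (PySem.Dict.mk s).getD "date" "" < date_str
      · rw [if_neg (by simp [hk]), if_pos hd, ih, List.filter_cons, List.filter_cons,
            if_pos (by simp [hk, hd]), if_neg (by simp [hk, hd])]
        simp
      · rw [if_neg (by simp [hk]), if_neg hd, ih, List.filter_cons, List.filter_cons,
            if_neg (by simp [hk, hd]), if_pos (by simp [hk, hd])]
        simp
    · rw [if_pos (by simp [hk]), ih,
          List.filter_cons, List.filter_cons, if_neg (by simp [hk]), if_neg (by simp [hk])]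

-- ===== VERDICT (by name: the statement is the Claim_ definition above) =====
theorem get_sessions_around_date_spec : Claim_equal_get_sessions_around_date := by
  intro sessions date_str project _
  show _ = _
  unfold get_sessions_around_date get_sessions_around_date_alt
  simpa using pvLoop_spec date_str project sessions [] []
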